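-- pv_equiv track=rewrite | github.com/HoroTW/justsayit | src/justsayit/paste.py | _pick_text_mime
-- ===== SOURCE A (Python) =====
-- _TEXT_MIME_PREFERENCE = (
--     "text/plain;charset=utf-8",
--     "text/plain",
--     "UTF8_STRING",
--     "STRING",
--     "TEXT",
-- )
--
-- def _pick_text_mime(offered: list[str]) -> str | None:
--     """Pick the best text MIME from what the clipboard advertises.
--     Returns ``None`` when no text type is offered (e.g. an image-only
--     clipboard) — signals the caller to skip instead of decoding binary
--     bytes as UTF-8."""
--     for pref in _TEXT_MIME_PREFERENCE:
--         if pref in offered: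
--             return pref
--     # Fallback: any ``text/*`` type we don't know by name.
--     for t in offered:
--         if t.startswith("text/"):
--             return t
--     return None
-- ===== SOURCE B (Python) =====
-- _TEXT_MIME_PREFERENCE = (
--     "text/plain;charset=utf-8",
--     "text/plain",
--     "UTF8_STRING",
--     "STRING",
--     "TEXT",
-- )
--
-- def _pick_text_mime(offered: list[str]) -> str | None:
--     """Single pass over ``offered``: rank each item (index in the
--     preference table, or 5 for an unknown ``text/*``), keep the best;
--     strict ``<`` keeps the first among equally ranked items."""
--     best = None  # (priority, mime)
--     for t in offered:
--         if t in _TEXT_MIME_PREFERENCE: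
--             p = _TEXT_MIME_PREFERENCE.index(t)
--         elif t.startswith("text/"):
--             p = 5
--         else:
--             continue
--         if best is None or p < best[0]:
--             best = (p, t)
--     return best[1] if best is not None else None
-- ===== Notes on version B (the rewrite author's own statement) =====
-- stated objective: alternative
-- what changed: A scans the preference table first (membership test per entry) and then rescans offered for a text/* fallback; B makes a single pass over offered, ranking each item (table index, or 5 for an unknown text/*) and keeping the first best-ranked item.
import Mathlib
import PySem

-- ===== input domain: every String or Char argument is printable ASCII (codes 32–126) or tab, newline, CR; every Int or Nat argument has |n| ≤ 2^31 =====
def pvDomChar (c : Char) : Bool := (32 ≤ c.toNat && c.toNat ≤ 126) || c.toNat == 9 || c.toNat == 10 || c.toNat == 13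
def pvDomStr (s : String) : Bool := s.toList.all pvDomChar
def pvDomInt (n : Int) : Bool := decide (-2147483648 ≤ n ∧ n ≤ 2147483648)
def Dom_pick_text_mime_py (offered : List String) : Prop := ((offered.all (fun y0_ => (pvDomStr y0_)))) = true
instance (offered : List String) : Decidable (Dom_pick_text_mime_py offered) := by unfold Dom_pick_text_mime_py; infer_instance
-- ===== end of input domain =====

-- B makes one ranked pass over `offered` instead of A's two ordered scans (preference table first, then text/* fallback); objective: alternative decomposition, same cost.

-- ===== PORT A =====
def pvPrefList : List String :=
  ["text/plain;charset=utf-8", "text/plain", "UTF8_STRING", "STRING", "TEXT"]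

-- 'for pref in _TEXT_MIME_PREFERENCE: if pref in offered: return pref' = find? over the tuple
def pick_text_mime_py (offered : List String) : Option String :=
  match pvPrefList.find? (fun pref => offered.contains pref) with
  | some pref => some pref
  | none => offered.find? (fun t => PySem.Str.startswith t "text/")

-- ===== PORT B =====
-- priority of one offered item: index in the table, 5 for unknown text/*, none = skipped
def pvPrio (t : String) : Option Nat :=
  if pvPrefList.contains t then PySem.List.index? pvPrefList t
  else if PySem.Str.startswith t "text/" then some 5
  else none

-- loop body: keep `best`; strict < keeps the first among equal priorities
def pvStep (acc : Option (Nat × String)) (t : String) : Option (Nat × String) :=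
  match pvPrio t with
  | none => acc
  | some p =>
    match acc with
    | none => some (p, t)
    | some (q, _) => if p < q then some (p, t) else acc

def pick_text_mime_py_alt (offered : List String) : Option String :=
  (offered.foldl pvStep none).map (·.2)

-- ===== PRECONDITION & SPEC =====
def Spec_pick_text_mime_py (offered : List String) (out : Option String) : Prop := out = pick_text_mime_py_alt offered
instance (offered : List String) (out : Option String) : Decidable (Spec_pick_text_mime_py offered out) := by unfold Spec_pick_text_mime_py; infer_instance

-- ===== CLAIM (what is proved, stated in full; the proofs are below) =====
def Claim_equal_pick_text_mime_py : Prop := ∀ (offered : List String), Dom_pick_text_mime_py offered → Spec_pick_text_mime_py offered (pick_text_mime_py offered)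

-- ===== LEMMAS AND PROOFS =====

-- a priority below 5 pins the string to the table entry of that index
theorem pvPrio_eq_low (t : String) (k : Nat) (hk : k < 5) :
    pvPrio t = some k ↔ t = pvPrefList.getD k "" := by
  unfold pvPrio
  by_cases hc : pvPrefList.contains t
  · have hm : t ∈ pvPrefList := by simpa using hc
    simp only [hc, if_true]
    simp only [pvPrefList, List.mem_cons, List.not_mem_nil, or_false] at hm
    interval_cases k <;>
      rcases hm with rfl | rfl | rfl | rfl | rfl <;> simp [pvPrefList] <;> decide
  · simp only [hc]
    constructor
    · intro h
      rw [if_neg (by simp)] at h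
      by_cases hs : PySem.Str.startswith t "text/" = true
      · have hs' : PySem.Chars.startswith t.toList ['t','e','x','t','/'] = true := by simpa using hs
        simp [hs'] at h
        exfalso; omega
      · have hs' : PySem.Chars.startswith t.toList ['t','e','x','t','/'] = false := by simpa using hs
        simp [hs'] at h
    · intro h
      exfalso; apply hc
      subst h
      interval_cases k <;> decide

theorem pvPrio_pref (k : Nat) (hk : k < 5) : pvPrio (pvPrefList.getD k "") = some k :=
  (pvPrio_eq_low _ k hk).mpr rfl

-- once best has priority q, elements of priority ≥ q leave it unchanged
theorem fold_keep (xs : List String) (q : Nat) (s : String)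
    (h : ∀ t ∈ xs, ∀ p, pvPrio t = some p → q ≤ p) :
    xs.foldl pvStep (some (q, s)) = some (q, s) := by
  induction xs with
  | nil => rfl
  | cons a tl ih =>
    have ha := h a (by simp)
    have hstep : pvStep (some (q, s)) a = some (q, s) := by
      unfold pvStep
      cases hp : pvPrio a with
      | none => rfl
      | some p =>
        have := ha p hp
        simp [Nat.not_lt.mpr this]
    simp only [List.foldl_cons, hstep]
    exact ih (fun t ht p hp => h t (by simp [ht]) p hp)

-- if the table entry of index k < 5 is in xs and no smaller priority occurs, the fold yields it
theorem fold_min (xs : List String) (k : Nat) (hk : k < 5) :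
    ∀ acc, pvPrefList.getD k "" ∈ xs →
    (∀ t ∈ xs, ∀ j, pvPrio t = some j → k ≤ j) →
    (acc = none ∨ ∃ q s, acc = some (q, s) ∧ k < q) →
    xs.foldl pvStep acc = some (k, pvPrefList.getD k "") := by
  induction xs with
  | nil => intro acc hmem; simp at hmem
  | cons a tl ih =>
    intro acc hmem hmin hacc
    by_cases hha : pvPrio a = some k
    · have ha : a = pvPrefList.getD k "" := (pvPrio_eq_low a k hk).mp hha
      have hstep : pvStep acc a = some (k, a) := by
        unfold pvStep
        rcases hacc with rfl | ⟨q, s, rfl, hq⟩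
        · simp [hha]
        · simp [hha, hq]
      have hstep' : pvStep acc a = some (k, pvPrefList.getD k "") := ha ▸ hstep
      rw [List.foldl_cons, hstep']
      exact fold_keep tl k _ (fun t ht p hp => hmin t (by simp [ht]) p hp)
    · have hmem' : pvPrefList.getD k "" ∈ tl := by
        rcases List.mem_cons.mp hmem with h | h
        · exact absurd (h ▸ pvPrio_pref k hk) hha
        · exact h
      have hacc' : pvStep acc a = none ∨ ∃ q s, pvStep acc a = some (q, s) ∧ k < q := by
        unfold pvStep
        cases hp : pvPrio a with
        | none => exact hacc
        | some p =>
          have hkle := hmin a (by simp) p hp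
          have hkp : k < p := lt_of_le_of_ne hkle (fun he => hha (by rw [hp, ← he]))
          rcases hacc with rfl | ⟨q, s, rfl, hq⟩
          · exact Or.inr ⟨p, a, rfl, hkp⟩
          · by_cases hpq : p < q
            · exact Or.inr ⟨p, a, by simp [hpq], hkp⟩
            · exact Or.inr ⟨q, s, by simp [hpq], hq⟩
      simp only [List.foldl_cons]
      exact ih _ hmem' (fun t ht j hj => hmin t (by simp [ht]) j hj) hacc'
    
-- when nothing from the table is offered, the fold is A's text/* fallback scan
theorem fold_fallback (xs : List String)
    (h : ∀ t ∈ xs, ¬ (pvPrefList.contains t = true)) :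
    (xs.foldl pvStep none).map (·.2) = xs.find? (fun t => PySem.Str.startswith t "text/") := by
  induction xs with
  | nil => rfl
  | cons a tl ih =>
    have ham : a ∉ pvPrefList := by simpa using h a (by simp)
    by_cases hs : PySem.Str.startswith a "text/" = true
    · have hs' : PySem.Chars.startswith a.toList ['t','e','x','t','/'] = true := by simpa using hs
      have hstep : pvStep none a = some (5, a) := by
        unfold pvStep pvPrio
        simp [ham, hs']
      have hkeep : tl.foldl pvStep (some (5, a)) = some (5, a) := by
        apply fold_keep
        intro t ht p hp
        have hct : t ∉ pvPrefList := by simpa using h t (by simp [ht])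
        unfold pvPrio at hp
        simp only [List.contains_eq_mem, hct, decide_false, Bool.false_eq_true, if_false] at hp
        split at hp <;> simp_all
      simp [List.foldl_cons, hstep, hkeep, List.find?, hs']
    · have hs' : PySem.Chars.startswith a.toList ['t','e','x','t','/'] = false := by simpa using hs
      have hstep : pvStep none a = none := by
        unfold pvStep pvPrio
        simp [ham, hs']
      have hfind : (a :: tl).find? (fun t => PySem.Str.startswith t "text/") =
          tl.find? (fun t => PySem.Str.startswith t "text/") := by
        simp [List.find?, hs']
      rw [List.foldl_cons, hstep, hfind]
      exact ih (fun t ht => h t (by simp [ht]))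

-- ===== VERDICT (by name: the statement is the Claim_ definition above) =====
theorem no_low (offered : List String) (k : Nat) (hk : k < 5)
    (h : ∀ j, j < k → ¬ (offered.contains (pvPrefList.getD j "") = true)) :
    ∀ t ∈ offered, ∀ j, pvPrio t = some j → k ≤ j := by
  intro t ht j hj
  by_contra hlt
  have hjk : j < k := Nat.lt_of_not_le hlt
  have hj5 : j < 5 := Nat.lt_trans hjk hk
  have ht' : t = pvPrefList.getD j "" := (pvPrio_eq_low t j hj5).mp hj
  exact h j hjk (List.contains_iff_exists_mem_beq.mpr ⟨t, ht, by simp [ht']⟩)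

theorem pick_text_mime_py_spec : Claim_equal_pick_text_mime_py := by
  intro offered _
  unfold Spec_pick_text_mime_py pick_text_mime_py pick_text_mime_py_alt
  by_cases c0 : "text/plain;charset=utf-8" ∈ offered <;>
  by_cases c1 : "text/plain" ∈ offered <;>
  by_cases c2 : "UTF8_STRING" ∈ offered <;>
  by_cases c3 : "STRING" ∈ offered <;>
  by_cases c4 : "TEXT" ∈ offered
  all_goals first
  | (rw [fold_min offered 0 (by norm_num) none (by simpa using c0)
        (no_low offered 0 (by norm_num) (by intro j hj; omega)) (Or.inl rfl)]
     simp [pvPrefList, c0])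
  | (rw [fold_min offered 1 (by norm_num) none (by simpa using c1)
        (no_low offered 1 (by norm_num) (by intro j hj; interval_cases j <;> simp [pvPrefList] <;> first | simpa using c0 | simpa using c1 | simpa using c2 | simpa using c3)) (Or.inl rfl)]
     simp [pvPrefList, List.find?, c0, c1])
  | (rw [fold_min offered 2 (by norm_num) none (by simpa using c2)
        (no_low offered 2 (by norm_num) (by intro j hj; interval_cases j <;> simp [pvPrefList] <;> first | simpa using c0 | simpa using c1 | simpa using c2 | simpa using c3)) (Or.inl rfl)]
     simp [pvPrefList, List.find?, c0, c1, c2])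
  | (rw [fold_min offered 3 (by norm_num) none (by simpa using c3)
        (no_low offered 3 (by norm_num) (by intro j hj; interval_cases j <;> simp [pvPrefList] <;> first | simpa using c0 | simpa using c1 | simpa using c2 | simpa using c3)) (Or.inl rfl)]
     simp [pvPrefList, List.find?, c0, c1, c2, c3])
  | (rw [fold_min offered 4 (by norm_num) none (by simpa using c4)
        (no_low offered 4 (by norm_num) (by intro j hj; interval_cases j <;> simp [pvPrefList] <;> first | simpa using c0 | simpa using c1 | simpa using c2 | simpa using c3)) (Or.inl rfl)]
     simp [pvPrefList, List.find?, c0, c1, c2, c3, c4])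
  | (have hall : ∀ t ∈ offered, ¬ (pvPrefList.contains t = true) := by
       intro t ht hc
       have hm : t ∈ pvPrefList := by simpa using hc
       have hto : offered.contains t = true := List.contains_iff_exists_mem_beq.mpr ⟨t, ht, by simp⟩
       simp only [pvPrefList, List.mem_cons, List.not_mem_nil, or_false] at hm
       rcases hm with rfl | rfl | rfl | rfl | rfl <;> simp_all
     rw [fold_fallback offered hall]
     simp [pvPrefList, List.find?, c0, c1, c2, c3, c4])
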